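-- pv_equiv track=rewrite | github.com/GustavoHenriqueGB/Estruturas-de-Dados | DeMeia-NoiteasSeis.py | estudaraNoite
-- ===== SOURCE A (Python) =====
-- def estudaraNoite(n, casosdeTeste):
--     resultados = []
--     for i in range(n):
--         planoEstudos = casosdeTeste[i][0]
--         matutino = casosdeTeste[i][1]
--         vespertino = casosdeTeste[i][2]
--         noturno = casosdeTeste[i][3]
--
--         planoContagem = {}
--         for conteudo in planoEstudos:
--             if conteudo in planoContagem:
--                 planoContagem[conteudo] += 1
--             else:
--                 planoContagem[conteudo] = 1
--
--         turnosContagem = {}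
--         for conteudo in matutino + vespertino + noturno:
--             if conteudo in turnosContagem:
--                 turnosContagem[conteudo] += 1
--             else:
--                 turnosContagem[conteudo] = 1
--
--         for conteudo in turnosContagem:
--             if conteudo not in planoContagem:
--                 resultados.append("You died!")
--                 break
--             elif turnosContagem[conteudo] > planoContagem[conteudo]:
--                 resultados.append("You died!")
--                 break
--         else:
--             conteudosNaoAbordados = []
--             for conteudo, quantidade in planoContagem.items():
--                 if conteudo not in turnosContagem or turnosContagem[conteudo] < quantidade:
--                     conteudosNaoAbordados.append(conteudo)
--
--             if not conteudosNaoAbordados: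
--                 resultados.append("It's in the box!")
--             else:
--                 conteudosaEstudar = sorted(conteudosNaoAbordados)
--                 resultados.append("Bora ralar: " + "".join(conteudosaEstudar))
--
--     return resultados
-- ===== SOURCE B (Python) =====
-- def estudaraNoite(n, casosdeTeste):
--     # Successive-removal algorithm: no counting at all. Each scheduled turn item
--     # removes one matching occurrence from a working copy of the study plan; a
--     # failed removal means over-scheduling ("You died!"), and the leftover copy
--     # is exactly the uncovered part of the plan.
--     resultados = []
--     for i in range(n):
--         caso = casosdeTeste[i]
--         restante = list(caso[0])
--         morreu = False
--         for x in caso[1] + caso[2] + caso[3]: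
--             if x in restante:
--                 restante.remove(x)
--             else:
--                 morreu = True
--                 break
--         if morreu:
--             resultados.append("You died!")
--         elif not restante:
--             resultados.append("It's in the box!")
--         else:
--             resultados.append("Bora ralar: " + "".join(sorted(set(restante))))
--     return resultados
-- ===== Notes on version B (the rewrite author's own statement) =====
-- stated objective: alternative
-- what changed: Replaces A's two frequency dictionaries and key-comparison loops with a counting-free successive-removal algorithm: each scheduled turn item removes one matching occurrence from a working copy of the plan (failed removal = 'You died!'), and the leftover copy directly yields the uncovered contents.
import Mathlib
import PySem

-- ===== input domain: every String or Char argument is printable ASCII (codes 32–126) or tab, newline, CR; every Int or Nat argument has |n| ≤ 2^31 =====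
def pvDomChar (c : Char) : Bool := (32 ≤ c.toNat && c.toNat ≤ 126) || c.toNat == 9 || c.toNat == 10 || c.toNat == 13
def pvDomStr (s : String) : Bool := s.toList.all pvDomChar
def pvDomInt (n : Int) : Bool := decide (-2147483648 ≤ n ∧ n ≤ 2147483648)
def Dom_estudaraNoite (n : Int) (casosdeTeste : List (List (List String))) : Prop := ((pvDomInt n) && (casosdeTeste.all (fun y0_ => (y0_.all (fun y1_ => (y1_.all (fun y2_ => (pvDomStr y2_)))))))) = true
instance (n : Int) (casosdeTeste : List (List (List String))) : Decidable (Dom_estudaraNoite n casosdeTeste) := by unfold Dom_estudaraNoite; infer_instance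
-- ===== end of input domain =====

-- B replaces A's two counting dictionaries and key-comparison loops by a counting-free
-- successive-removal algorithm over a working copy of the plan (objective: alternative, not faster).


-- ===== PORT A =====
-- body of A's per-test-case iteration (caso = casosdeTeste[i])
def pvCaseA (caso : List (List String)) : String :=
  let planoEstudos := (PySem.List.pyGet? caso 0).getD []
  let matutino := (PySem.List.pyGet? caso 1).getD []
  let vespertino := (PySem.List.pyGet? caso 2).getD []
  let noturno := (PySem.List.pyGet? caso 3).getD []
  let planoContagem := planoEstudos.foldl
    (fun d x => if d.contains x then d.modify x 0 (· + 1) else d.insert x 1) PySem.Dict.empty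
  let turnosContagem := (matutino ++ vespertino ++ noturno).foldl
    (fun d x => if d.contains x then d.modify x 0 (· + 1) else d.insert x 1) PySem.Dict.empty
  -- 'for conteudo in turnosContagem: … break / else:' — the loop appends "You died!" iff some key offends
  if turnosContagem.keys.any
      (fun k => !planoContagem.contains k || decide (planoContagem.getD k 0 < turnosContagem.getD k 0)) then
    "You died!"
  else
    let conteudosNaoAbordados := planoContagem.items.foldl
      (fun (acc : List String) (p : String × Int) => if !turnosContagem.contains p.1 || decide (turnosContagem.getD p.1 0 < p.2) then acc ++ [p.1] else acc) ([] : List String)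
    if conteudosNaoAbordados = [] then "It's in the box!"
    else "Bora ralar: " ++ PySem.Str.join "" (PySem.List.sorted conteudosNaoAbordados (fun x => x) false)

def estudaraNoite (n : Int) (casosdeTeste : List (List (List String))) : List String :=
  (PySem.List.pyRange 0 n 1).foldl
    (fun resultados i => resultados ++ [pvCaseA ((PySem.List.pyGet? casosdeTeste i).getD [])]) ([] : List String)

-- ===== PORT B =====
-- B's inner 'for x in turnos: if x in restante: restante.remove(x) else: morreu = True; break'
-- (none = the loop broke with morreu; some r = the final restante)
def pvRemoveLoop : List String → List String → Option (List String)
  | [], restante => some restante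
  | x :: xs, restante =>
      if restante.contains x then
        pvRemoveLoop xs ((PySem.List.remove? restante x).getD restante)
      else none

-- body of B's per-test-case iteration
def pvCaseB (caso : List (List String)) : String :=
  let restante := (PySem.List.pyGet? caso 0).getD []
  let turnos := (PySem.List.pyGet? caso 1).getD [] ++ (PySem.List.pyGet? caso 2).getD [] ++ (PySem.List.pyGet? caso 3).getD []
  match pvRemoveLoop turnos restante with
  | none => "You died!"
  | some r =>
      if r = [] then "It's in the box!"
      else "Bora ralar: " ++ PySem.Str.join "" (PySem.List.sorted (PySem.Set.ofList r : List String) (fun x => x) false)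

def estudaraNoite_alt (n : Int) (casosdeTeste : List (List (List String))) : List String :=
  (PySem.List.pyRange 0 n 1).foldl
    (fun resultados i => resultados ++ [pvCaseB ((PySem.List.pyGet? casosdeTeste i).getD [])]) ([] : List String)

-- ===== PRECONDITION & SPEC =====
-- A raises IndexError iff n exceeds len(casosdeTeste) or some of the first n test cases has fewer than 4 turn lists.
def Pre_estudaraNoite (n : Int) (casosdeTeste : List (List (List String))) : Prop :=
  n ≤ (casosdeTeste.length : Int) ∧ ∀ caso ∈ casosdeTeste.take n.toNat, 4 ≤ caso.length
instance (n : Int) (casosdeTeste : List (List (List String))) : Decidable (Pre_estudaraNoite n casosdeTeste) := by unfold Pre_estudaraNoite; infer_instance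
def pvWitness_estudaraNoite : Int × List (List (List String)) := (1, [[["a"], ["a"], [], []]])
def Spec_estudaraNoite (n : Int) (casosdeTeste : List (List (List String))) (out : List String) : Prop := out = estudaraNoite_alt n casosdeTeste
instance (n : Int) (casosdeTeste : List (List (List String))) (out : List String) : Decidable (Spec_estudaraNoite n casosdeTeste out) := by unfold Spec_estudaraNoite; infer_instance

-- ===== CLAIM (what is proved, stated in full; the proofs are below) =====
def Claim_equal_estudaraNoite : Prop := ∀ (n : Int) (casosdeTeste : List (List (List String))), Dom_estudaraNoite n casosdeTeste → Pre_estudaraNoite n casosdeTeste → Spec_estudaraNoite n casosdeTeste (estudaraNoite n casosdeTeste)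

-- ===== LEMMAS AND PROOFS =====

-- common count-based characterisation of the per-case answer (proof helper only)
def pvSpecCase (plano turnos : List String) : String :=
  if (PySem.Set.ofList turnos).any (fun x => decide (plano.count x < turnos.count x)) then
    "You died!"
  else if plano.all (fun x => decide (plano.count x ≤ turnos.count x)) then
    "It's in the box!"
  else
    "Bora ralar: " ++ PySem.Str.join ""
      (PySem.List.sorted
        (PySem.Set.ofList (plano.filter (fun x => decide (turnos.count x < plano.count x))) : List String)
        (fun x => x) false)

-- A's 'if conteudo in d: d[conteudo] += 1 else: d[conteudo] = 1' step is Counter's step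
theorem pv_step_eq_modify (d : PySem.Dict String Int) (x : String) :
    (if d.contains x then d.modify x 0 (· + 1) else d.insert x 1) = d.modify x 0 (· + 1) := by
  by_cases h : d.contains x = true
  · simp [h]
  · simp only [Bool.not_eq_true] at h
    have hg : d.getD x 0 = 0 := PySem.Dict.getD_of_not_contains d 0 h
    simp [h, PySem.Dict.modify, PySem.Dict.insert, hg]

theorem pv_countfold_eq_counter (xs : List String) :
    xs.foldl (fun d x => if d.contains x then d.modify x 0 (· + 1) else d.insert x 1)
      PySem.Dict.empty = PySem.Dict.counter xs := by
  rw [PySem.Dict.counter_eq_foldl]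
  exact PySem.List.foldl_congr_mem xs _ _ _ (fun acc x _ => pv_step_eq_modify acc x)

-- A's per-case body computes the count-based characterisation
theorem pv_bodyA_eq (plano turnos : List String) :
    (let planoContagem := plano.foldl
        (fun d x => if d.contains x then d.modify x 0 (· + 1) else d.insert x 1) PySem.Dict.empty
     let turnosContagem := turnos.foldl
        (fun d x => if d.contains x then d.modify x 0 (· + 1) else d.insert x 1) PySem.Dict.empty
     if turnosContagem.keys.any
        (fun k => !planoContagem.contains k || decide (planoContagem.getD k 0 < turnosContagem.getD k 0)) then
       "You died!"
     else
       let conteudosNaoAbordados := planoContagem.items.foldl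
         (fun (acc : List String) (p : String × Int) => if !turnosContagem.contains p.1 || decide (turnosContagem.getD p.1 0 < p.2) then acc ++ [p.1] else acc) ([] : List String)
       if conteudosNaoAbordados = [] then "It's in the box!"
       else "Bora ralar: " ++ PySem.Str.join "" (PySem.List.sorted conteudosNaoAbordados (fun x => x) false))
    = pvSpecCase plano turnos := by
  unfold pvSpecCase
  simp only [pv_countfold_eq_counter]
  have hdied : (PySem.Dict.counter turnos).keys.any
      (fun k => !(PySem.Dict.counter plano).contains k ||
        decide ((PySem.Dict.counter plano).getD k 0 < (PySem.Dict.counter turnos).getD k 0))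
      = (PySem.Set.ofList turnos).any (fun x => decide (plano.count x < turnos.count x)) := by
    rw [PySem.Dict.keys_counter]
    refine PySem.List.any_congr_mem (fun k hk => ?_)
    rw [PySem.Set.mem_ofList] at hk
    by_cases hp : k ∈ plano
    · have hp' : plano.contains k = true := by simpa using hp
      simp only [PySem.Dict.contains_counter, PySem.Dict.getD_counter, hp', Bool.not_true,
        Bool.false_or]
      exact decide_eq_decide.mpr Nat.cast_lt
    · have hp' : plano.contains k = false := by simpa using hp
      have h0 : plano.count k = 0 := List.count_eq_zero.mpr hp
      have h1 : 0 < turnos.count k := List.count_pos_iff.mpr hk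
      simp [PySem.Dict.contains_counter, PySem.Dict.getD_counter, h0, h1]
  rw [hdied]
  by_cases hany : (PySem.Set.ofList turnos).any (fun x => decide (plano.count x < turnos.count x)) = true
  · simp [hany]
  · simp only [Bool.not_eq_true] at hany
    rw [hany]
    rw [if_neg Bool.false_ne_true, if_neg Bool.false_ne_true]
    have hna : (PySem.Dict.counter plano).items.foldl
        (fun (acc : List String) (p : String × Int) => if !(PySem.Dict.counter turnos).contains p.1 ||
          decide ((PySem.Dict.counter turnos).getD p.1 0 < p.2) then acc ++ [p.1] else acc) ([] : List String)
        = (PySem.Set.ofList plano).filter (fun k => decide (turnos.count k < plano.count k)) := by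
      rw [PySem.List.foldl_append_if]
      rw [PySem.Dict.items_counter, List.filter_map, List.map_map]
      simp only [List.nil_append, Function.comp_def, List.map_id']
      refine List.filter_congr (fun k hk => ?_)
      have hkp : k ∈ plano := (PySem.Set.mem_ofList _ _).mp hk
      by_cases ht : k ∈ turnos
      · have ht' : turnos.contains k = true := by simpa using ht
        simp only [PySem.Dict.contains_counter, PySem.Dict.getD_counter, ht', Bool.not_true,
          Bool.false_or]
        exact decide_eq_decide.mpr Nat.cast_lt
      · have ht' : turnos.contains k = false := by simpa using ht
        have h0 : turnos.count k = 0 := List.count_eq_zero.mpr ht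
        have h1 : 0 < plano.count k := List.count_pos_iff.mpr hkp
        simp [PySem.Dict.contains_counter, PySem.Dict.getD_counter, h0, h1]
    rw [hna]
    have hempty : ((PySem.Set.ofList plano).filter (fun k => decide (turnos.count k < plano.count k)) = [])
        ↔ (plano.all (fun x => decide (plano.count x ≤ turnos.count x)) = true) := by
      rw [List.filter_eq_nil_iff, List.all_eq_true]
      constructor
      · intro h x hx
        have := h x ((PySem.Set.mem_ofList _ _).mpr hx)
        simpa [Nat.not_lt] using this
      · intro h x hx
        have := h x ((PySem.Set.mem_ofList _ _).mp hx)
        simpa [Nat.not_lt] using this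
    by_cases he : (PySem.Set.ofList plano).filter (fun k => decide (turnos.count k < plano.count k)) = []
    · rw [if_pos he, if_pos (hempty.mp he)]
    · rw [if_neg he, if_neg (fun hall => he (hempty.mpr hall))]
      have hperm : ((PySem.Set.ofList plano).filter (fun k => decide (turnos.count k < plano.count k))).Perm
          (PySem.Set.ofList (plano.filter (fun x => decide (turnos.count x < plano.count x)))) := by
        refine (List.perm_ext_iff_of_nodup ?_ ?_).mpr (fun x => ?_)
        · exact (PySem.Set.nodup_ofList plano).filter _
        · exact PySem.Set.nodup_ofList _
        · simp [List.mem_filter, PySem.Set.mem_ofList, and_comm]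
      rw [PySem.List.sorted_eq_sorted_of_perm _ _ _ (fun a b h => h) hperm]

theorem pvCaseA_eq_spec (caso : List (List String)) :
    pvCaseA caso = pvSpecCase ((PySem.List.pyGet? caso 0).getD [])
      ((PySem.List.pyGet? caso 1).getD [] ++ (PySem.List.pyGet? caso 2).getD [] ++ (PySem.List.pyGet? caso 3).getD []) := by
  unfold pvCaseA
  exact pv_bodyA_eq _ _

-- B's removal loop breaks iff the turns multiset is not contained in the plan
theorem pvRemoveLoop_none_iff (ts : List String) : ∀ r : List String,
    pvRemoveLoop ts r = none ↔ ¬ ∀ x, ts.count x ≤ r.count x := by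
  induction ts with
  | nil => intro r; simp [pvRemoveLoop]
  | cons x xs ih =>
    intro r
    by_cases hx : x ∈ r
    · have hc : r.contains x = true := by simpa using hx
      have hrm : (PySem.List.remove? r x).getD r = r.erase x := by
        rw [PySem.List.remove?_eq_some_erase _ _ hx]; rfl
      rw [pvRemoveLoop, if_pos hc, hrm, ih]
      have hpos : 0 < r.count x := List.count_pos_iff.mpr hx
      constructor
      · intro h hall
        refine h (fun y => ?_)
        have h1 := hall y
        rw [List.count_cons] at h1
        rw [List.count_erase]
        by_cases hyx : y = x
        · subst hyx; simp at h1 ⊢; omega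
        · simp [Ne.symm hyx] at h1 ⊢; omega
      · intro h hall
        refine h (fun y => ?_)
        have h1 := hall y
        rw [List.count_erase] at h1
        rw [List.count_cons]
        by_cases hyx : y = x
        · subst hyx; simp at h1 ⊢; omega
        · simp [Ne.symm hyx] at h1 ⊢; omega
    · have hc : ¬ (r.contains x = true) := by simpa using hx
      rw [pvRemoveLoop, if_neg hc]
      have h0 : r.count x = 0 := List.count_eq_zero.mpr hx
      constructor
      · intro _ hall
        have := hall x
        rw [List.count_cons_self, h0] at this
        omega
      · intro _; rfl
  -- (structure: induction over the turns list, case split on membership)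

-- when the loop finishes, the leftover counts are the truncated differences
theorem pvRemoveLoop_some_count (ts : List String) : ∀ r r' : List String,
    pvRemoveLoop ts r = some r' → ∀ y, r'.count y = r.count y - ts.count y := by
  induction ts with
  | nil => intro r r' h y; simp [pvRemoveLoop] at h; simp [h]
  | cons x xs ih =>
    intro r r' h y
    by_cases hx : x ∈ r
    · have hc : r.contains x = true := by simpa using hx
      have hrm : (PySem.List.remove? r x).getD r = r.erase x := by
        rw [PySem.List.remove?_eq_some_erase _ _ hx]; rfl
      rw [pvRemoveLoop, if_pos hc, hrm] at h
      have h1 := ih (r.erase x) r' h y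
      have hpos : 0 < r.count x := List.count_pos_iff.mpr hx
      rw [List.count_erase] at h1
      rw [List.count_cons]
      by_cases hyx : y = x
      · subst hyx; simp at h1 ⊢; omega
      · simp [Ne.symm hyx] at h1 ⊢; omega
    · have hc : ¬ (r.contains x = true) := by simpa using hx
      rw [pvRemoveLoop, if_neg hc] at h
      exact absurd h (by simp)

theorem pv_bodyB_eq (plano turnos : List String) :
    (match pvRemoveLoop turnos plano with
     | none => "You died!"
     | some r =>
        if r = [] then "It's in the box!"
        else "Bora ralar: " ++ PySem.Str.join "" (PySem.List.sorted (PySem.Set.ofList r : List String) (fun x => x) false))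
    = pvSpecCase plano turnos := by
  unfold pvSpecCase
  rcases hL : pvRemoveLoop turnos plano with _ | r
  · -- loop broke: some turn count exceeds the plan count
    have hnone := (pvRemoveLoop_none_iff turnos plano).mp hL
    push Not at hnone
    obtain ⟨x, hx⟩ := hnone
    have hxt : x ∈ turnos := List.count_pos_iff.mp (by omega)
    have hany : (PySem.Set.ofList turnos).any (fun x => decide (plano.count x < turnos.count x)) = true := by
      rw [List.any_eq_true]
      exact ⟨x, (PySem.Set.mem_ofList _ _).mpr hxt, by simpa using hx⟩
    show "You died!" = _
    rw [if_pos hany]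
  · -- loop finished: r is the multiset difference plano - turnos
    have hsub : ∀ x, turnos.count x ≤ plano.count x := by
      by_contra h
      exact absurd hL (by rw [(pvRemoveLoop_none_iff turnos plano).mpr h]; simp)
    have hcnt := pvRemoveLoop_some_count turnos plano r hL
    have hany : (PySem.Set.ofList turnos).any (fun x => decide (plano.count x < turnos.count x)) = false := by
      rw [Bool.eq_false_iff]
      intro h
      rw [List.any_eq_true] at h
      obtain ⟨x, _, hx⟩ := h
      have := hsub x
      simp at hx
      omega
    show (if r = [] then "It's in the box!"
      else "Bora ralar: " ++ PySem.Str.join "" (PySem.List.sorted (PySem.Set.ofList r : List String) (fun x => x) false)) = _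
    rw [hany, if_neg Bool.false_ne_true]
    have hempty : (r = []) ↔ (plano.all (fun x => decide (plano.count x ≤ turnos.count x)) = true) := by
      rw [List.all_eq_true]
      constructor
      · intro h x _
        have := hcnt x
        rw [h] at this
        simp at this ⊢
        omega
      · intro h
        rw [List.eq_nil_iff_forall_not_mem]
        intro x hx
        have hpos : 0 < r.count x := List.count_pos_iff.mpr hx
        have hcx := hcnt x
        have hxp : x ∈ plano := List.count_pos_iff.mp (by omega)
        have := h x hxp
        simp at this
        omega
    by_cases he : r = []
    · rw [if_pos he, if_pos (hempty.mp he)]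
    · rw [if_neg he, if_neg (fun hall => he (hempty.mpr hall))]
      have hperm : (PySem.Set.ofList r : List String).Perm
          (PySem.Set.ofList (plano.filter (fun x => decide (turnos.count x < plano.count x)))) := by
        refine (List.perm_ext_iff_of_nodup (PySem.Set.nodup_ofList _) (PySem.Set.nodup_ofList _)).mpr (fun x => ?_)
        rw [PySem.Set.mem_ofList, PySem.Set.mem_ofList, List.mem_filter]
        constructor
        · intro hx
          have hpos : 0 < r.count x := List.count_pos_iff.mpr hx
          have := hcnt x
          have hlt : turnos.count x < plano.count x := by omega
          exact ⟨List.count_pos_iff.mp (by omega), by simpa using hlt⟩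
        · intro ⟨_, hx⟩
          simp at hx
          have := hcnt x
          exact List.count_pos_iff.mp (by omega)
      rw [PySem.List.sorted_eq_sorted_of_perm _ _ _ (fun a b h => h) hperm]

theorem pvCaseB_eq_spec (caso : List (List String)) :
    pvCaseB caso = pvSpecCase ((PySem.List.pyGet? caso 0).getD [])
      ((PySem.List.pyGet? caso 1).getD [] ++ (PySem.List.pyGet? caso 2).getD [] ++ (PySem.List.pyGet? caso 3).getD []) := by
  unfold pvCaseB
  exact pv_bodyB_eq _ _

theorem estudaraNoite_eq_alt (n : Int) (casosdeTeste : List (List (List String))) :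
    estudaraNoite n casosdeTeste = estudaraNoite_alt n casosdeTeste := by
  unfold estudaraNoite estudaraNoite_alt
  simp only [pvCaseA_eq_spec, pvCaseB_eq_spec]

-- ===== VERDICT (by name: the statement is the Claim_ definition above) =====
theorem estudaraNoite_spec : Claim_equal_estudaraNoite := by
  intro n casosdeTeste _ _
  unfold Spec_estudaraNoite
  exact estudaraNoite_eq_alt n casosdeTeste
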